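-- pv_equiv track=rewrite | github.com/gembleman/eztrans-rs | scripts/update_char_ranges.py | find_unicode_ranges
-- ===== SOURCE A (Python) =====
-- from typing import List, Tuple, Set
--
-- def find_unicode_ranges(code_points: List[int]) -> List[Tuple[int, int]]:
--     """연속된 유니코드 코드 포인트들을 범위로 그룹화"""
--     if not code_points:
--         return []
--
--     sorted_points = sorted(set(code_points))
--     ranges = []
--     start = sorted_points[0]
--     end = sorted_points[0]
--
--     for point in sorted_points[1:]:
--         if point == end + 1:
--             end = point
--         else:
--             ranges.append((start, end))
--             start = point
--             end = point
--
--     ranges.append((start, end))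
--     return ranges
-- ===== SOURCE B (Python) =====
-- def find_unicode_ranges(code_points):
--     """연속된 유니코드 코드 포인트들을 범위로 그룹화 (boundary detection: a point
--     is a range start iff point-1 is absent, an end iff point+1 is absent)."""
--     s = set(code_points)
--     starts = sorted(p for p in s if p - 1 not in s)
--     ends = sorted(p for p in s if p + 1 not in s)
--     return list(zip(starts, ends))
-- ===== Notes on version B (the rewrite author's own statement) =====
-- stated objective: alternative
-- what changed: B replaces A's sorted-scan with start/end accumulator state by boundary detection on the set: a point is a range start iff point-1 is not in the set and a range end iff point+1 is not, so B filters the set twice by membership, sorts starts and ends, and zips them.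
import Mathlib
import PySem

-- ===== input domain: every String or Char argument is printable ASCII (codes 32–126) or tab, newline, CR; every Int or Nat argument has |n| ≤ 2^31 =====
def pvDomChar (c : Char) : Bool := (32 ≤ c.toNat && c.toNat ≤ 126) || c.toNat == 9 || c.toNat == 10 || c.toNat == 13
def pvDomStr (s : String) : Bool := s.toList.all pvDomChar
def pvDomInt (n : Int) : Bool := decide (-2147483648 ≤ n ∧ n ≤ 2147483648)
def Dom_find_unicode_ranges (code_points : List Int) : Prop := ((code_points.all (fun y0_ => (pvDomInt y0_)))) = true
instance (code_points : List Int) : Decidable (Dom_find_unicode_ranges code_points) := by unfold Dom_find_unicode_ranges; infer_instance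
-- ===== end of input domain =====

-- B replaces A's start/end accumulator scan by boundary detection on the set (a point starts a range iff point-1 is absent, ends one iff point+1 is absent; sorted starts zipped with sorted ends); alternative algorithm, same cost.


-- ===== PORT A =====
-- A's for-loop over sorted_points[1:] with state (ranges, start, end); ranges.append = acc ++ [·]
def pvLoopA (ranges : List (Int × Int)) (start e : Int) (rest : List Int) : List (Int × Int) :=
  match rest with
  | [] => ranges ++ [(start, e)]
  | p :: rest' =>
      if p = e + 1 then pvLoopA ranges start p rest'
      else pvLoopA (ranges ++ [(start, e)]) p p rest'

def find_unicode_ranges (code_points : List Int) : List (Int × Int) :=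
  if code_points = [] then []
  else
    match PySem.List.sorted (PySem.Set.ofList code_points) (fun x => x) false with
    | [] => []   -- unreachable: code_points ≠ [] so sorted(set(..)) ≠ []
    | s0 :: rest => pvLoopA [] s0 s0 rest

-- ===== PORT B =====
-- Source B: s = set(code_points); starts = the points whose predecessor is absent, ends = those whose successor is absent; zip sorted starts with sorted ends
def find_unicode_ranges_alt (code_points : List Int) : List (Int × Int) :=
  let s := PySem.Set.ofList code_points
  let starts := PySem.List.sorted (s.filter (fun p => !(PySem.Set.contains s (p - 1)))) (fun x => x) false
  let ends := PySem.List.sorted (s.filter (fun p => !(PySem.Set.contains s (p + 1)))) (fun x => x) false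
  starts.zip ends

-- ===== PRECONDITION & SPEC =====
def Spec_find_unicode_ranges (code_points : List Int) (out : List (Int × Int)) : Prop := out = find_unicode_ranges_alt code_points
instance (code_points : List Int) (out : List (Int × Int)) : Decidable (Spec_find_unicode_ranges code_points out) := by unfold Spec_find_unicode_ranges; infer_instance

-- ===== CLAIM (what is proved, stated in full; the proofs are below) =====
def Claim_equal_find_unicode_ranges : Prop := ∀ (code_points : List Int), Dom_find_unicode_ranges code_points → Spec_find_unicode_ranges code_points (find_unicode_ranges code_points)

-- ===== LEMMAS AND PROOFS =====

-- A's loop, re-expressed back-to-front: a right fold of the range-merging step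
def pvStepC (res : List (Int × Int)) (p : Int) : List (Int × Int) :=
  match res with
  | (a, b) :: t => if a = p + 1 then (p, b) :: t else (p, p) :: (a, b) :: t
  | [] => [(p, p)]

def pvMerge (s e : Int) (res : List (Int × Int)) : List (Int × Int) :=
  match res with
  | (a, b) :: t => if a = e + 1 then (s, b) :: t else (s, e) :: (a, b) :: t
  | [] => [(s, e)]

def pvG (L : List Int) : List (Int × Int) := L.foldr (fun p r => pvStepC r p) []

-- B's two filters, expressed over the sorted strictly-increasing list
def pvSt (L : List Int) : List Int := L.filter (fun q => !(L.contains (q - 1)))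
def pvEn (L : List Int) : List Int := L.filter (fun q => !(L.contains (q + 1)))

theorem pvStepC_eq_merge (res : List (Int × Int)) (p : Int) : pvStepC res p = pvMerge p p res := by
  cases res with
  | nil => rfl
  | cons h t => rcases h with ⟨a, b⟩; rfl

theorem pvStepC_head (res : List (Int × Int)) (p : Int) :
    ∃ b t, pvStepC res p = (p, b) :: t := by
  cases res with
  | nil => exact ⟨p, [], rfl⟩
  | cons h t =>
      rcases h with ⟨a, b⟩
      by_cases hc : a = p + 1
      · exact ⟨b, t, by simp [pvStepC, hc]⟩
      · exact ⟨p, (a, b) :: t, by simp [pvStepC, hc]⟩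

theorem pvLoopA_eq (rest : List Int) :
    ∀ (acc : List (Int × Int)) (s e : Int),
      pvLoopA acc s e rest = acc ++ pvMerge s e (pvG rest) := by
  induction rest with
  | nil => intro acc s e; rfl
  | cons p rest' ih =>
      intro acc s e
      unfold pvLoopA
      have hG : pvG (p :: rest') = pvStepC (pvG rest') p := rfl
      by_cases hc : p = e + 1
      · rw [if_pos hc, ih, hG]
        subst hc
        congr 1
        cases hf : pvG rest' with
        | nil => simp [pvStepC, pvMerge]
        | cons h0 t0 =>
            rcases h0 with ⟨a0, b0⟩
            by_cases ha : a0 = e + 1 + 1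
            · simp [pvStepC, pvMerge, ha]
            · simp [pvStepC, pvMerge, ha]
      · rw [if_neg hc, ih, hG, pvStepC_eq_merge]
        rcases pvStepC_head (pvG rest') p with ⟨b, t, hh⟩
        rw [pvStepC_eq_merge] at hh
        rw [hh]
        simp [pvMerge, hc]

theorem pv_not_contains (l : List Int) (x : Int) (h : ∀ q ∈ l, q ≠ x) : (!(l.contains x)) = true := by
  simp only [Bool.not_eq_eq_eq_not, Bool.not_true, Bool.eq_false_iff, ne_eq]
  intro hc
  rw [List.contains_iff_mem] at hc
  exact h x hc rfl

theorem pv_contains (l : List Int) (x : Int) (h : x ∈ l) : ¬ (!(l.contains x)) = true := by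
  simp [h]

theorem pv_main (L : List Int) (h : L.Pairwise (· < ·)) :
    pvG L = (pvSt L).zip (pvEn L) ∧ (pvSt L).length = (pvEn L).length := by
  induction L with
  | nil => exact ⟨rfl, rfl⟩
  | cons s0 rest ih =>
      rw [List.pairwise_cons] at h
      obtain ⟨hlt, hrest⟩ := h
      obtain ⟨ihz, ihl⟩ := ih hrest
      -- s0 is always a start of L
      have hst0 : (!((s0 :: rest).contains (s0 - 1))) = true := by
        apply pv_not_contains
        intro q hq
        rcases List.mem_cons.mp hq with rfl | hq'
        · omega
        · have := hlt q hq'; omega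
      cases rest with
      | nil =>
          refine ⟨?_, ?_⟩ <;>
            simp [pvG, pvSt, pvEn, pvStepC]
      | cons p0 rest' =>
          have hlt0 : s0 < p0 := hlt p0 (by simp)
          have hp0 : ∀ q ∈ rest', p0 < q := (List.pairwise_cons.mp hrest).1
          -- start filter over rest' is the same w.r.t. L and w.r.t. rest
          have hC1 : ∀ q ∈ rest', (!((s0 :: p0 :: rest').contains (q - 1))) =
              (!((p0 :: rest').contains (q - 1))) := by
            intro q hq
            have hqa : p0 < q := hp0 q hq
            simp only [List.contains_cons]
            have : ((q - 1 == s0) : Bool) = false := by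
              simp only [beq_eq_false_iff_ne, ne_eq]; omega
            rw [this]; simp
          have hC2 : ∀ q ∈ (p0 :: rest'), (!((s0 :: p0 :: rest').contains (q + 1))) =
              (!((p0 :: rest').contains (q + 1))) := by
            intro q hq
            have hqa : s0 < q := hlt q hq
            simp only [List.contains_cons]
            have : ((q + 1 == s0) : Bool) = false := by
              simp only [beq_eq_false_iff_ne, ne_eq]; omega
            rw [this]; simp
          -- pvSt rest starts with p0
          have hstp0 : (!((p0 :: rest').contains (p0 - 1))) = true := by
            apply pv_not_contains
            intro q hq
            rcases List.mem_cons.mp hq with rfl | hq'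
            · omega
            · have := hp0 q hq'; omega
          have hStRest : pvSt (p0 :: rest') =
              p0 :: rest'.filter (fun q => !((p0 :: rest').contains (q - 1))) :=
            List.filter_cons_of_pos hstp0
          by_cases hp : p0 = s0 + 1
          · -- consecutive: s0 absorbs p0's range
            have hpl : ¬ (!((s0 :: p0 :: rest').contains (p0 - 1))) = true := by
              apply pv_contains
              exact List.mem_cons.mpr (Or.inl (by omega))
            have h1 : List.filter (fun q => !((s0 :: p0 :: rest').contains (q - 1))) (s0 :: p0 :: rest') =
                s0 :: List.filter (fun q => !((s0 :: p0 :: rest').contains (q - 1))) (p0 :: rest') :=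
              List.filter_cons_of_pos hst0
            have h2 : List.filter (fun q => !((s0 :: p0 :: rest').contains (q - 1))) (p0 :: rest') =
                List.filter (fun q => !((s0 :: p0 :: rest').contains (q - 1))) rest' :=
              List.filter_cons_of_neg hpl
            have h3 : List.filter (fun q => !((s0 :: p0 :: rest').contains (q - 1))) rest' =
                List.filter (fun q => !((p0 :: rest').contains (q - 1))) rest' :=
              List.filter_congr hC1
            have hStL : pvSt (s0 :: p0 :: rest') =
                s0 :: rest'.filter (fun q => !((p0 :: rest').contains (q - 1))) := by
              show List.filter (fun q => !((s0 :: p0 :: rest').contains (q - 1))) (s0 :: p0 :: rest') = _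
              rw [h1, h2, h3]
            have hEnL : pvEn (s0 :: p0 :: rest') = pvEn (p0 :: rest') := by
              have he0 : ¬ (!((s0 :: p0 :: rest').contains (s0 + 1))) = true := by
                apply pv_contains
                exact List.mem_cons.mpr (Or.inr (List.mem_cons.mpr (Or.inl (by omega))))
              have h4 : List.filter (fun q => !((s0 :: p0 :: rest').contains (q + 1))) (s0 :: p0 :: rest') =
                  List.filter (fun q => !((s0 :: p0 :: rest').contains (q + 1))) (p0 :: rest') :=
                List.filter_cons_of_neg he0
              show List.filter (fun q => !((s0 :: p0 :: rest').contains (q + 1))) (s0 :: p0 :: rest') = _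
              rw [h4]
              exact List.filter_congr hC2
            rw [hStRest] at ihz ihl
            -- pvEn rest is nonempty of matching length
            cases hEn : pvEn (p0 :: rest') with
            | nil => rw [hEn] at ihl; simp at ihl
            | cons b er' =>
                rw [hEn] at ihz ihl
                refine ⟨?_, ?_⟩
                · have : pvG (s0 :: p0 :: rest') = pvStepC (pvG (p0 :: rest')) s0 := rfl
                  rw [this, ihz, hStL, hEnL, hEn]
                  simp [pvStepC, hp]
                · rw [hStL, hEnL, hEn]
                  simp at ihl ⊢
                  omega
          · -- gap: s0 is its own singleton range
            have hs1 : s0 + 1 < p0 := by omega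
            have h1 : List.filter (fun q => !((s0 :: p0 :: rest').contains (q - 1))) (s0 :: p0 :: rest') =
                s0 :: List.filter (fun q => !((s0 :: p0 :: rest').contains (q - 1))) (p0 :: rest') :=
              List.filter_cons_of_pos hst0
            have hStL : pvSt (s0 :: p0 :: rest') = s0 :: pvSt (p0 :: rest') := by
              show List.filter (fun q => !((s0 :: p0 :: rest').contains (q - 1))) (s0 :: p0 :: rest') = _
              rw [h1]
              congr 1
              apply List.filter_congr
              intro q hq
              rcases List.mem_cons.mp hq with rfl | hq'
              · simp only [List.contains_cons]
                have : ((q - 1 == s0) : Bool) = false := by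
                  simp only [beq_eq_false_iff_ne, ne_eq]; omega
                rw [this]; simp
              · exact hC1 q hq'
            have hEnL : pvEn (s0 :: p0 :: rest') = s0 :: pvEn (p0 :: rest') := by
              have he0 : (!((s0 :: p0 :: rest').contains (s0 + 1))) = true := by
                apply pv_not_contains
                intro q hq
                rcases List.mem_cons.mp hq with rfl | hq'
                · omega
                · rcases List.mem_cons.mp hq' with rfl | hq''
                  · omega
                  · have := hp0 q hq''; omega
              have h4 : List.filter (fun q => !((s0 :: p0 :: rest').contains (q + 1))) (s0 :: p0 :: rest') =
                  s0 :: List.filter (fun q => !((s0 :: p0 :: rest').contains (q + 1))) (p0 :: rest') :=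
                List.filter_cons_of_pos he0
              show List.filter (fun q => !((s0 :: p0 :: rest').contains (q + 1))) (s0 :: p0 :: rest') = _
              rw [h4]
              congr 1
              exact List.filter_congr hC2
            rw [hStRest] at ihz ihl
            cases hEn : pvEn (p0 :: rest') with
            | nil => rw [hEn] at ihl; simp at ihl
            | cons b er' =>
                rw [hEn] at ihz ihl
                refine ⟨?_, ?_⟩
                · have : pvG (s0 :: p0 :: rest') = pvStepC (pvG (p0 :: rest')) s0 := rfl
                  rw [this, ihz, hStL, hEnL, hStRest, hEn]
                  simp [pvStepC, hp]
                · rw [hStL, hEnL, hStRest, hEn]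
                  simp at ihl ⊢
                  omega

-- B's two sorted filters over the unsorted set ARE pvSt/pvEn of the sorted list
theorem pv_alt_eq (code_points : List Int) :
    find_unicode_ranges_alt code_points =
      (pvSt (PySem.List.sorted (PySem.Set.ofList code_points) (fun x => x) false)).zip
        (pvEn (PySem.List.sorted (PySem.Set.ofList code_points) (fun x => x) false)) := by
  set s := PySem.Set.ofList code_points with hs
  set L := PySem.List.sorted s (fun x => x) false with hL
  have hcontains : ∀ x : Int, PySem.Set.contains s x = L.contains x := by
    intro x
    rw [Bool.eq_iff_iff, PySem.Set.contains_iff, List.contains_iff_mem]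
    exact (PySem.List.mem_sorted s (fun x => x) false x).symm
  have hperm : L.Perm s := PySem.List.sorted_perm s (fun x => x) false
  have hlt : L.Pairwise (· < ·) := by
    rw [hL, hs]; exact PySem.List.sorted_ofList_pairwise_lt code_points
  have hstart : PySem.List.sorted (s.filter (fun p => !(PySem.Set.contains s (p - 1)))) (fun x => x) false = pvSt L := by
    apply PySem.List.sorted_eq_of_perm_of_pairwise_lt
    · have h1 : pvSt L = L.filter (fun p => !(PySem.Set.contains s (p - 1))) :=
        List.filter_congr (fun q _ => by rw [hcontains])
      rw [h1]
      exact hperm.filter _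
    · exact List.Pairwise.filter _ hlt
  have hend : PySem.List.sorted (s.filter (fun p => !(PySem.Set.contains s (p + 1)))) (fun x => x) false = pvEn L := by
    apply PySem.List.sorted_eq_of_perm_of_pairwise_lt
    · have h1 : pvEn L = L.filter (fun p => !(PySem.Set.contains s (p + 1))) :=
        List.filter_congr (fun q _ => by rw [hcontains])
      rw [h1]
      exact hperm.filter _
    · exact List.Pairwise.filter _ hlt
  show (PySem.List.sorted (s.filter _) _ false).zip (PySem.List.sorted (s.filter _) _ false) = _
  rw [hstart, hend]

-- ===== VERDICT (by name: the statement is the Claim_ definition above) =====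
theorem find_unicode_ranges_spec : Claim_equal_find_unicode_ranges := by
  intro code_points _
  unfold Spec_find_unicode_ranges
  rw [pv_alt_eq]
  unfold find_unicode_ranges
  by_cases hnil : code_points = []
  · subst hnil
    rfl
  · rw [if_neg hnil]
    cases hsrt : PySem.List.sorted (PySem.Set.ofList code_points) (fun x => x) false with
    | nil =>
        exfalso
        have := (PySem.List.sorted_eq_nil_iff (PySem.Set.ofList code_points) (fun x => x) false).mp hsrt
        rcases List.exists_mem_of_ne_nil _ hnil with ⟨x, hx⟩
        have : x ∈ PySem.Set.ofList code_points := by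
          simpa [PySem.Set.mem_ofList] using hx
        simp_all
    | cons s0 rest =>
        have hlt : (s0 :: rest).Pairwise (· < ·) := by
          rw [← hsrt]; exact PySem.List.sorted_ofList_pairwise_lt code_points
        have hA : pvLoopA [] s0 s0 rest = pvG (s0 :: rest) := by
          rw [pvLoopA_eq, List.nil_append, ← pvStepC_eq_merge]
          rfl
        show pvLoopA [] s0 s0 rest = _
        rw [hA, (pv_main (s0 :: rest) hlt).1]
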